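-- pv_equiv track=rewrite | github.com/SaraTahiri/Automatisation_Analyse_Email_IA | features/feature_extraction.py | extract_text_features
-- ===== SOURCE A (Python) =====
-- SUSPICIOUS_WORDS = [
--     "urgent", "verify", "account", "password",
--     "confirm", "security", "update", "login"
-- ]
--
-- def extract_text_features(text):
--     features = {}
--
--     words = text.split()
--
--     features["text_length"] = len(text)
--     features["word_count"] = len(words)
--     features["suspicious_word_count"] = sum(
--         1 for w in words if w in SUSPICIOUS_WORDS
--     )
--
--     return features
-- ===== SOURCE B (Python) =====
-- SUSPICIOUS_WORDS = [
--     "urgent", "verify", "account", "password",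
--     "confirm", "security", "update", "login"
-- ]
--
-- def extract_text_features(text):
--     # Tally the words once, then drive the suspicious count off the fixed
--     # vocabulary by reading tallies (inverted loop direction vs scanning words).
--     words = text.split()
--     tally = {}
--     for w in words:
--         tally[w] = tally.get(w, 0) + 1
--     return {
--         "text_length": len(text),
--         "word_count": len(words),
--         "suspicious_word_count": sum(tally.get(w, 0) for w in SUSPICIOUS_WORDS),
--     }
-- ===== Notes on version B (the rewrite author's own statement) =====
-- stated objective: alternative
-- what changed: B builds a frequency table of the split words in one pass and computes the suspicious count by summing the tallies of the fixed 8-word vocabulary, instead of testing every word against the vocabulary list.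
import Mathlib
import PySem

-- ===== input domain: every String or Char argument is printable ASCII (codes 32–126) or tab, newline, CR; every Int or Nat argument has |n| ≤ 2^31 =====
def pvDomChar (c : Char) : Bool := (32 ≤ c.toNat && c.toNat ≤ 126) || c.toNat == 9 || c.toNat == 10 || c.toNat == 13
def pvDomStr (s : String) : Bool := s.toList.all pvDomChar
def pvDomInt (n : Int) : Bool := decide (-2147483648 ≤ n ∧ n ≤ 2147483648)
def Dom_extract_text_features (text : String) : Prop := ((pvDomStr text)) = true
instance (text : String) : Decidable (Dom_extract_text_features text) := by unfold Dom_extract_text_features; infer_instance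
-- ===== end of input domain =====

-- B tallies the split words once and sums the tallies of the fixed vocabulary,
-- instead of testing each word for membership in the vocabulary (alternative shape, same cost class).

def pvSuspiciousWords : List String :=
  ["urgent", "verify", "account", "password", "confirm", "security", "update", "login"]

-- ===== PORT A =====
def extract_text_features (text : String) : List (String × Int) :=
  let features : PySem.Dict String Int := PySem.Dict.empty
  let words := PySem.Str.split₀ text
  let features := features.insert "text_length" (PySem.Str.len text)
  let features := features.insert "word_count" (words.length : Int)
  let features := features.insert "suspicious_word_count"
    (words.foldl (fun acc w => if w ∈ pvSuspiciousWords then acc + 1 else acc) 0)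
  features.items

-- ===== PORT B =====
def extract_text_features_alt (text : String) : List (String × Int) :=
  let words := PySem.Str.split₀ text
  let tally : PySem.Dict String Int :=
    words.foldl (fun d w => d.insert w (d.getD w 0 + 1)) PySem.Dict.empty
  [("text_length", PySem.Str.len text),
   ("word_count", (words.length : Int)),
   ("suspicious_word_count", (pvSuspiciousWords.map (fun w => tally.getD w 0)).sum)]

-- ===== PRECONDITION & SPEC =====
def Spec_extract_text_features (text : String) (out : List (String × Int)) : Prop := out = extract_text_features_alt text
instance (text : String) (out : List (String × Int)) : Decidable (Spec_extract_text_features text out) := by unfold Spec_extract_text_features; infer_instance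

-- ===== CLAIM (what is proved, stated in full; the proofs are below) =====
def Claim_equal_extract_text_features : Prop := ∀ (text : String), Dom_extract_text_features text → Spec_extract_text_features text (extract_text_features text)

-- ===== LEMMAS AND PROOFS =====

theorem pv_sum_map_add {a : Type} (S : List a) (f g : a -> Int) :
    (S.map (fun w => f w + g w)).sum = (S.map f).sum + (S.map g).sum := by
  induction S with
  | nil => simp
  | cons s S ih => simp only [List.map_cons, List.sum_cons, ih]; ring

-- sum over a duplicate-free list of indicators 'w == x' is the membership indicator
theorem sum_ind_eq_mem {a : Type} [BEq a] [LawfulBEq a] (S : List a) (x : a) (h : S.Nodup) :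
    (S.map (fun w => if x == w then (1 : Int) else 0)).sum = if x ∈ S then 1 else 0 := by
  induction S with
  | nil => simp
  | cons s S ih =>
    simp only [List.nodup_cons] at h
    by_cases hs : s = x
    · subst hs
      have hz : (S.map (fun w => if s == w then (1 : Int) else 0)).sum = 0 := by
        rw [List.sum_eq_zero]
        intro y hy
        simp only [List.mem_map] at hy
        obtain ⟨w, hw, rfl⟩ := hy
        have hne : s ≠ w := fun he => h.1 (he ▸ hw)
        simp [hne]
      simp [hz]
    · have hb : (x == s) = false := by simp [Ne.symm hs]
      simp only [List.map_cons, List.sum_cons, hb, ih h.2]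
      simp [Ne.symm hs]

-- sum of per-vocabulary-word occurrence counts equals the count of words in the vocabulary
theorem sum_count_eq_countP {a : Type} [BEq a] [LawfulBEq a] (S ws : List a) (h : S.Nodup) :
    (S.map (fun w => ((ws.count w : Nat) : Int))).sum
      = ((ws.countP (fun x => decide (x ∈ S)) : Nat) : Int) := by
  induction ws with
  | nil => simp
  | cons x ws ih =>
    simp only [List.count_cons, List.countP_cons]
    push_cast
    have hmapeq : (S.map (fun w => ((ws.count w : Nat) : Int) + if (x == w) then (1:Int) else 0)).sum
        = (S.map (fun w => ((ws.count w : Nat) : Int))).sum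
          + (S.map (fun w => if (x == w) then (1:Int) else 0)).sum :=
      pv_sum_map_add S _ _
    rw [hmapeq, ih, sum_ind_eq_mem S x h]
    by_cases hx : x ∈ S <;> simp [hx]

theorem pvSuspicious_nodup : pvSuspiciousWords.Nodup := by decide

-- ===== VERDICT (by name: the statement is the Claim_ definition above) =====
theorem extract_text_features_spec : Claim_equal_extract_text_features := by
  intro text _
  show extract_text_features text = extract_text_features_alt text
  unfold extract_text_features extract_text_features_alt
  simp only [PySem.Dict.getD_foldl_insert_add_one, PySem.Dict.getD_empty, zero_add]
  have hcount : (PySem.Str.split₀ text).foldl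
      (fun acc w => if w ∈ pvSuspiciousWords then acc + 1 else acc) (0 : Int)
      = (pvSuspiciousWords.map (fun w => (((PySem.Str.split₀ text).count w : Nat) : Int))).sum := by
    rw [sum_count_eq_countP _ _ pvSuspicious_nodup]
    rw [PySem.List.foldl_ite_add_one]
    simp
  rw [hcount]
  rfl
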